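-- pv_equiv track=rewrite | github.com/tsadpbb/atropos | environments/hack0/protein_design_env/models/alphafold2_multimer.py | _split_pdb_content
-- ===== SOURCE A (Python) =====
-- from typing import Dict, List, Any, Optional, Tuple
--
-- def _split_pdb_content(concatenated_pdb_str: str) -> List[str]:
--     """
--     Splits a string containing concatenated PDB file contents.
--     Assumes models are separated by "ENDMDL" or just "END" for the last/single model.
--     """
--     pdbs = []
--     current_pdb_lines = []
--     if not concatenated_pdb_str:
--         return []
--
--     for line in concatenated_pdb_str.splitlines(keepends=True):
--         current_pdb_lines.append(line)
--         if line.startswith("ENDMDL") or line.startswith("END "):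
--             pdbs.append("".join(current_pdb_lines).strip())
--             current_pdb_lines = []
--
--     if current_pdb_lines:
--         remaining_pdb = "".join(current_pdb_lines).strip()
--         if remaining_pdb:
--             pdbs.append(remaining_pdb)
--
--     return [pdb for pdb in pdbs if pdb]
-- ===== SOURCE B (Python) =====
-- from typing import List
--
-- def _split_pdb_content(concatenated_pdb_str: str) -> List[str]:
--     lines = concatenated_pdb_str.splitlines(keepends=True)
--     bounds = [i + 1 for i, line in enumerate(lines)
--               if line.startswith("ENDMDL") or line.startswith("END ")]
--     if not bounds or bounds[-1] != len(lines):
--         bounds.append(len(lines))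
--     out = []
--     start = 0
--     for b in bounds:
--         segment = "".join(lines[start:b]).strip()
--         if segment:
--             out.append(segment)
--         start = b
--     return out
-- ===== Notes on version B (the rewrite author's own statement) =====
-- stated objective: alternative
-- what changed: Replaces A's interleaved accumulate-and-emit line buffer with a two-pass index-then-chunk decomposition: first collect terminator boundary indices from enumerate(lines), then slice, join and strip each consecutive chunk, keeping the non-empty ones.
import Mathlib
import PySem

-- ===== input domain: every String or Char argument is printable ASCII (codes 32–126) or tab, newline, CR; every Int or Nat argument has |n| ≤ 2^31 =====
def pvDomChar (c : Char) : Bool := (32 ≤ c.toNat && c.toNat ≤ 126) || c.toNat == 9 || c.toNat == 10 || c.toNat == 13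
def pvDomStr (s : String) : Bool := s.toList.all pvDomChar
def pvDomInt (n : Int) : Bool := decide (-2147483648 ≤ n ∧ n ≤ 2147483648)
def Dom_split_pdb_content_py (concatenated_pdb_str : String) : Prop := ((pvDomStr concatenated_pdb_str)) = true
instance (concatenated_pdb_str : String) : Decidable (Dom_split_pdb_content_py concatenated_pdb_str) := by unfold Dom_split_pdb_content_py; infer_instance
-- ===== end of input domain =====

-- B replaces A's interleaved accumulate-and-emit buffer by an index-then-chunk decomposition
-- (boundary indices first, then slice/join/strip each chunk); alternative, not claimed faster.

-- ===== PORT A =====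
-- shared predicate: line.startswith("ENDMDL") or line.startswith("END ") (both Pythons test it verbatim)
def pvIsEnd (line : List Char) : Bool :=
  PySem.Chars.startswith line "ENDMDL".toList || PySem.Chars.startswith line "END ".toList

-- hand port of str.splitlines(keepends=True): exact on the Dom alphabet, whose only
-- line-break characters are '\n', '\r' and "\r\n" (Python's extra breaks \v \f \x1c-\x1e \x85 … are outside Dom)
def pyLinesKeep : List Char → List (List Char)
  | [] => []
  | c :: rest =>
    if c = '\n' then ['\n'] :: pyLinesKeep rest
    else if c = '\r' then
      match rest with
      | [] => [['\r']]
      | d :: rest' =>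
        if d = '\n' then ['\r', '\n'] :: pyLinesKeep rest'
        else ['\r'] :: pyLinesKeep (d :: rest')
    else
      match pyLinesKeep rest with
      | [] => [[c]]
      | l :: ls => (c :: l) :: ls

def split_pdb_content_py (concatenated_pdb_str : String) : List String :=
  if concatenated_pdb_str = "" then []
  else
    let st := (pyLinesKeep concatenated_pdb_str.toList).foldl
      (fun (st : List String × List (List Char)) line =>
        let cur := st.2 ++ [line]
        if pvIsEnd line then
          (st.1 ++ [String.ofList (PySem.Chars.strip (PySem.Chars.join [] cur))], [])
        else (st.1, cur)) ([], [])
    let pdbs :=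
      if st.2 ≠ [] then
        let remaining := PySem.Chars.strip (PySem.Chars.join [] st.2)
        if remaining ≠ [] then st.1 ++ [String.ofList remaining] else st.1
      else st.1
    pdbs.filter (fun p => decide (p ≠ ""))

-- ===== PORT B =====
-- the 'for b in bounds' loop of Source B, with its (out, start) state threaded through the recursion
def pvAltGo : List (List Char) → Int → List Int → List String
  | _, _, [] => []
  | lines, start, b :: bs =>
    let seg := PySem.Chars.strip (PySem.Chars.join [] (PySem.List.slice lines (some start) (some b)))
    (if seg ≠ [] then [String.ofList seg] else []) ++ pvAltGo lines b bs

def split_pdb_content_py_alt (concatenated_pdb_str : String) : List String :=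
  let lines := pyLinesKeep concatenated_pdb_str.toList
  let bounds := ((PySem.List.enumerate lines).filter (fun il => pvIsEnd il.2)).map (fun il => il.1 + 1)
  let bounds :=
    if bounds = [] ∨ bounds.getLast? ≠ some (lines.length : Int)
    then bounds ++ [(lines.length : Int)] else bounds
  pvAltGo lines 0 bounds

-- ===== PRECONDITION & SPEC =====
def Spec_split_pdb_content_py (concatenated_pdb_str : String) (out : List String) : Prop := out = split_pdb_content_py_alt concatenated_pdb_str
instance (concatenated_pdb_str : String) (out : List String) : Decidable (Spec_split_pdb_content_py concatenated_pdb_str out) := by unfold Spec_split_pdb_content_py; infer_instance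

-- ===== CLAIM (what is proved, stated in full; the proofs are below) =====
def Claim_equal_split_pdb_content_py : Prop := ∀ (concatenated_pdb_str : String), Dom_split_pdb_content_py concatenated_pdb_str → Spec_split_pdb_content_py concatenated_pdb_str (split_pdb_content_py concatenated_pdb_str)

-- ===== LEMMAS AND PROOFS =====

-- the stripped chunk a buffer cur yields, and its contribution to the output
def pvStrip1 (cur : List (List Char)) : List Char := PySem.Chars.strip (PySem.Chars.join [] cur)
def pvEmit (r : List Char) : List String := if r ≠ [] then [String.ofList r] else []

-- common specification: process the line list with the current buffer cur
def pvSpecS (cur : List (List Char)) : List (List Char) → List String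
  | [] => pvEmit (pvStrip1 cur)
  | l :: ls =>
    if pvIsEnd l then pvEmit (pvStrip1 (cur ++ [l])) ++ pvSpecS [] ls
    else pvSpecS (cur ++ [l]) ls

-- B's raw boundary list, and B's boundary list after the final-bound adjustment
def pvBRec (k : Int) : List (List Char) → List Int
  | [] => []
  | l :: ls => (if pvIsEnd l then [k + 1] else []) ++ pvBRec (k + 1) ls

def pvFRec (k : Int) : List (List Char) → List Int
  | [] => [k]
  | l :: ls =>
    if pvIsEnd l then (k + 1) :: (if ls = [] then [] else pvFRec (k + 1) ls)
    else pvFRec (k + 1) ls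

theorem pvStrip_nil : PySem.Chars.strip [] = [] := by decide

theorem pvFilter_append_emit (p : List String) (r : List Char) :
    (p ++ [String.ofList r]).filter (fun q => decide (q ≠ "")) =
      p.filter (fun q => decide (q ≠ "")) ++ pvEmit r := by
  rw [List.filter_append]
  by_cases h : r = []
  · simp [pvEmit, h]
  · simp [pvEmit, h]

theorem pvEnum_bounds (ls : List (List Char)) : ∀ (k : Int),
    ((PySem.List.enumerate ls k).filter (fun il => pvIsEnd il.2)).map (fun il => il.1 + 1)
      = pvBRec k ls := by
  induction ls with
  | nil => intro k; simp [PySem.List.enumerate, pvBRec]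
  | cons l ls ih =>
    intro k
    rw [PySem.List.enumerate_cons, List.filter_cons]
    by_cases h : pvIsEnd l
    · simp [h, pvBRec, ih (k + 1)]
    · simp [h, pvBRec, ih (k + 1)]

theorem pvAdj_bounds (ls : List (List Char)) : ∀ (k : Int),
    (if pvBRec k ls = [] ∨ (pvBRec k ls).getLast? ≠ some (k + ls.length)
     then pvBRec k ls ++ [k + ls.length] else pvBRec k ls) = pvFRec k ls := by
  induction ls with
  | nil => intro k; simp [pvBRec, pvFRec]
  | cons l ls ih =>
    intro k
    have hL : (k + ((l :: ls).length : Int)) = (k + 1) + (ls.length : Int) := by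
      push_cast [List.length_cons]; ring
    by_cases h : pvIsEnd l
    · cases hls : ls with
      | nil => simp [pvBRec, pvFRec, h]
      | cons m ms =>
        subst hls
        have ih' := ih (k + 1)
        rw [hL]
        rw [show pvBRec k (l :: m :: ms) = (k + 1) :: pvBRec (k + 1) (m :: ms) from by
              rw [pvBRec]; simp [h]]
        rw [show pvFRec k (l :: m :: ms) = (k + 1) :: pvFRec (k + 1) (m :: ms) from by
              rw [pvFRec]; simp [h]]
        simp only [List.cons_ne_nil, false_or]
        cases ht : pvBRec (k + 1) (m :: ms) with
        | nil =>
          have hfr : pvFRec (k + 1) (m :: ms) = [k + 1 + ((m :: ms).length : Int)] := by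
            rw [← ih', if_pos (Or.inl ht), ht, List.nil_append]
          have hne : (k + 1 : Int) ≠ k + 1 + ((m :: ms).length : Int) := by
            push_cast [List.length_cons]; omega
          rw [hfr]
          simp
          omega
        | cons b bs =>
          rw [ht] at ih'
          simp only [List.cons_ne_nil, false_or] at ih'
          rw [← ih', List.getLast?_cons_cons]
          split <;> simp_all
    · have ih' := ih (k + 1)
      rw [hL]
      simpa [pvBRec, pvFRec, h] using ih'

theorem pvSlice_mid (pre mid rest : List (List Char)) :
    PySem.List.slice (pre ++ (mid ++ rest)) (some (pre.length : Int))
      (some ((pre.length + mid.length : Nat) : Int)) = mid := by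
  rw [PySem.List.slice_natCast]
  rw [List.drop_left]
  have : pre.length + mid.length - pre.length = mid.length := by omega
  rw [this]
  simp

theorem pvMainB (ls : List (List Char)) : ∀ (pre cur : List (List Char)),
    pvAltGo (pre ++ (cur ++ ls)) (pre.length : Int)
      (pvFRec ((pre.length : Int) + (cur.length : Int)) ls) = pvSpecS cur ls := by
  induction ls with
  | nil =>
    intro pre cur
    have hc : ((pre.length : Int) + (cur.length : Int)) = ((pre.length + cur.length : Nat) : Int) := by
      push_cast; ring
    simp only [pvFRec, pvAltGo]
    rw [hc, pvSlice_mid pre cur []]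
    simp [pvSpecS, pvEmit, pvStrip1]
  | cons l ls ih =>
    intro pre cur
    by_cases h : pvIsEnd l
    · have hb : ((pre.length : Int) + (cur.length : Int)) + 1
          = ((pre.length + (cur ++ [l]).length : Nat) : Int) := by
        push_cast [List.length_append, List.length_cons, List.length_nil]; ring
      cases hls : ls with
      | nil =>
        subst hls
        have hsplit : pre ++ (cur ++ [l]) = pre ++ ((cur ++ [l]) ++ ([] : List (List Char))) := by
          simp
        simp only [pvFRec, h, ite_true, pvSpecS, pvAltGo]
        rw [hsplit, hb, pvSlice_mid pre (cur ++ [l]) []]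
        simp [pvEmit, pvStrip1, pvStrip_nil]
      | cons m ms =>
        subst hls
        have hsplit : pre ++ (cur ++ l :: m :: ms) = pre ++ ((cur ++ [l]) ++ (m :: ms)) := by
          simp
        simp only [pvFRec, h, ite_true, List.cons_ne_nil, if_neg, not_false_iff,
          pvSpecS, pvAltGo]
        rw [hsplit, hb, pvSlice_mid pre (cur ++ [l]) (m :: ms)]
        congr 1
        have ih' := ih (pre ++ (cur ++ [l])) []
        rw [show ((pre ++ (cur ++ [l])) ++ (([] : List (List Char)) ++ (m :: ms)))
              = pre ++ ((cur ++ [l]) ++ (m :: ms)) from by simp] at ih'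
        rw [show (((pre ++ (cur ++ [l])).length : Nat) : Int)
              = ((pre.length + (cur ++ [l]).length : Nat) : Int) from by rw [List.length_append]] at ih'
        rw [show (((pre.length + (cur ++ [l]).length : Nat) : Int)
                + ((([] : List (List Char)).length : Nat) : Int))
              = ((pre.length + (cur ++ [l]).length : Nat) : Int) from by simp] at ih'
        exact ih'
    · have harg : ((pre.length : Int) + (cur.length : Int)) + 1
          = (pre.length : Int) + ((cur ++ [l]).length : Int) := by
        push_cast [List.length_append, List.length_cons, List.length_nil]; ring
      have hsplit : pre ++ (cur ++ l :: ls) = pre ++ ((cur ++ [l]) ++ ls) := by simp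
      simp only [pvFRec, h, Bool.false_eq_true, if_neg, not_false_iff, pvSpecS]
      rw [hsplit, harg]
      exact ih pre (cur ++ [l])

theorem pvMainA (ls : List (List Char)) : ∀ (pdbs : List String) (cur : List (List Char)),
    (let st := ls.foldl
        (fun (st : List String × List (List Char)) line =>
          let cur := st.2 ++ [line]
          if pvIsEnd line then
            (st.1 ++ [String.ofList (PySem.Chars.strip (PySem.Chars.join [] cur))], [])
          else (st.1, cur)) (pdbs, cur);
      (if st.2 ≠ [] then
        (if PySem.Chars.strip (PySem.Chars.join [] st.2) ≠ [] then
          st.1 ++ [String.ofList (PySem.Chars.strip (PySem.Chars.join [] st.2))] else st.1)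
       else st.1).filter (fun p => decide (p ≠ "")))
      = pdbs.filter (fun p => decide (p ≠ "")) ++ pvSpecS cur ls := by
  induction ls with
  | nil =>
    intro pdbs cur
    simp only [List.foldl_nil, pvSpecS, pvStrip1]
    by_cases hc : cur = []
    · simp [hc, pvEmit, pvStrip_nil]
    · rw [if_pos hc]
      by_cases hr : PySem.Chars.strip (PySem.Chars.join [] cur) = []
      · simp [hr, pvEmit]
      · rw [if_pos hr, pvFilter_append_emit]
  | cons l ls ih =>
    intro pdbs cur
    by_cases h : pvIsEnd l
    · simp only [List.foldl_cons, h, ite_true, pvSpecS, pvStrip1]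
      rw [ih, pvFilter_append_emit]
      simp [pvEmit]
    · simp only [List.foldl_cons, h, Bool.false_eq_true, ite_false, pvSpecS, pvStrip1]
      rw [ih]

-- ===== VERDICT (by name: the statement is the Claim_ definition above) =====
theorem split_pdb_content_py_spec : Claim_equal_split_pdb_content_py := by
  intro s _
  unfold Spec_split_pdb_content_py
  by_cases hs : s = ""
  · subst hs; decide
  · have hA : split_pdb_content_py s = pvSpecS [] (pyLinesKeep s.toList) := by
      unfold split_pdb_content_py
      rw [if_neg hs]
      simpa using pvMainA (pyLinesKeep s.toList) [] []
    have hB : split_pdb_content_py_alt s = pvSpecS [] (pyLinesKeep s.toList) := by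
      unfold split_pdb_content_py_alt
      have he := pvEnum_bounds (pyLinesKeep s.toList) 0
      have ha := pvAdj_bounds (pyLinesKeep s.toList) 0
      rw [zero_add] at ha
      have hm := pvMainB (pyLinesKeep s.toList) [] []
      simp only [List.nil_append, List.length_nil, Nat.cast_zero, add_zero] at hm
      simp only []
      rw [he, ha]
      exact hm
    rw [hA, hB]
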